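-- pv_equiv track=rewrite | github.com/lobami/python | sudoku2.py | check_all_rows
-- ===== SOURCE A (Python) =====
-- def check_all_rows(grid):
--     i = 0
--     while i < len(grid):
--         j = 0
--         dic = set()
--         while j < len(grid[i]):
--             if grid[i][j] != '.' and grid[i][j] in dic:
--                 return False
--             else:
--                 dic.add(grid[i][j])
--             j += 1
--         i += 1
--     return True
-- ===== SOURCE B (Python) =====
-- def check_all_rows(grid):
--     for row in grid:
--         vals = sorted(v for v in row if v != '.')
--         if any(x == y for x, y in zip(vals, vals[1:])):
--             return False
--     return True
-- ===== Notes on version B (the rewrite author's own statement) =====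
-- stated objective: alternative
-- what changed: Replaces A's per-element hash-set membership checks with a set-free sort-then-scan: sort each row's non-'.' values and report a duplicate iff two adjacent sorted values are equal.
import Mathlib
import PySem

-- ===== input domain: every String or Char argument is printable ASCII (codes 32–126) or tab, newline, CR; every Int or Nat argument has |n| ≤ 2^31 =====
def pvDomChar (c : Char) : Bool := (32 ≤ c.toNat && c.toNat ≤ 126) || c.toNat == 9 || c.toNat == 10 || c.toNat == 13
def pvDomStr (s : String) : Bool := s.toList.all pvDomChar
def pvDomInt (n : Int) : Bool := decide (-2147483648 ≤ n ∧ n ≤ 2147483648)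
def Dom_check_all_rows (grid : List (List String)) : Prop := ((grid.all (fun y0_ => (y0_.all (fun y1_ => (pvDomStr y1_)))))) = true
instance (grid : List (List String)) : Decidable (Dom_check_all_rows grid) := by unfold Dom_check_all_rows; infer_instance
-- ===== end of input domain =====

-- B replaces A's per-element hash-set membership checks with a set-free sort-then-adjacent-scan
-- per row (sort the non-'.' values, a duplicate exists iff two adjacent sorted values are equal);
-- a genuinely different algorithm of similar cost.


-- ===== PORT A =====
-- inner while loop: j walks the row, dic is the accumulated set; 'return False' propagates out
def pvRowLoopA (row : List String) (dic : PySem.Set String) : Bool :=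
  match row with
  | [] => true
  | v :: rest =>
      if v != "." && PySem.Set.contains dic v then false
      else pvRowLoopA rest (PySem.Set.add dic v)

-- outer while loop: i walks the rows; a False from the inner loop returns from the function
def check_all_rows (grid : List (List String)) : Bool :=
  match grid with
  | [] => true
  | row :: rest =>
      if pvRowLoopA row PySem.Set.empty then check_all_rows rest else false

-- ===== PORT B =====
-- any(x == y for x, y in zip(vals, vals[1:])): scan adjacent pairs of the list
def pvHasAdjDup (l : List String) : Bool :=
  match l with
  | a :: b :: t => a == b || pvHasAdjDup (b :: t)
  | _ => false

def check_all_rows_alt (grid : List (List String)) : Bool :=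
  grid.all (fun row =>
    let vals := PySem.List.sorted (row.filter (fun v => v != ".")) (fun x => x) false
    !pvHasAdjDup vals)

-- ===== PRECONDITION & SPEC =====
def Spec_check_all_rows (grid : List (List String)) (out : Bool) : Prop := out = check_all_rows_alt grid
instance (grid : List (List String)) (out : Bool) : Decidable (Spec_check_all_rows grid out) := by unfold Spec_check_all_rows; infer_instance

-- ===== CLAIM =====
def Claim_equal_check_all_rows : Prop := ∀ (grid : List (List String)), Dom_check_all_rows grid → Spec_check_all_rows grid (check_all_rows grid)

-- ===== LEMMAS AND PROOFS =====

-- on a list sorted by ≤, 'no equal adjacent pair' is exactly Nodup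
lemma hasAdjDup_sorted (l : List String) (h : l.Pairwise (· ≤ ·)) :
    pvHasAdjDup l = false ↔ l.Nodup := by
  induction l with
  | nil => simp [pvHasAdjDup]
  | cons a t ih =>
      cases t with
      | nil => simp [pvHasAdjDup]
      | cons b t' =>
          rcases List.pairwise_cons.mp h with ⟨hale, htail⟩
          have hble : ∀ x ∈ t', b ≤ x := (List.pairwise_cons.mp htail).1
          simp only [pvHasAdjDup, Bool.or_eq_false_iff, beq_eq_false_iff_ne, ih htail,
            List.nodup_cons]
          constructor
          · rintro ⟨hab, hbnot, hnd⟩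
            refine ⟨?_, hbnot, hnd⟩
            intro hmem
            rcases List.mem_cons.mp hmem with rfl | hmem'
            · exact hab rfl
            · exact hab (le_antisymm (hale b List.mem_cons_self) (hble a hmem'))
          · rintro ⟨hanot, hbnot, hnd⟩
            exact ⟨fun hab => hanot (hab ▸ List.mem_cons_self), hbnot, hnd⟩

-- A's inner loop succeeds iff the non-'.' values of the row are duplicate-free and disjoint from dic
lemma rowLoopA_eq (row : List String) (dic : PySem.Set String) :
    pvRowLoopA row dic = true ↔
      (row.filter (fun v => v != ".")).Nodup ∧
      ∀ v ∈ row.filter (fun v => v != "."), v ∉ dic := by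
  induction row generalizing dic with
  | nil => simp [pvRowLoopA]
  | cons v rest ih =>
      by_cases hdot : v = "."
      · subst hdot
        have hstep : pvRowLoopA ("." :: rest) dic = pvRowLoopA rest (PySem.Set.add dic ".") := by
          rfl
        have hfil : ("." :: rest).filter (fun v => v != ".") =
            rest.filter (fun v => v != ".") := by simp
        rw [hstep, ih, hfil]
        constructor
        · rintro ⟨hnd, hdisj⟩
          refine ⟨hnd, fun y hy hyd => hdisj y hy ?_⟩
          rw [PySem.Set.mem_add]
          exact Or.inl hyd
        · rintro ⟨hnd, hdisj⟩
          refine ⟨hnd, fun y hy hmem => ?_⟩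
          rw [PySem.Set.mem_add] at hmem
          rcases hmem with h1 | h1
          · exact hdisj y hy h1
          · have := (List.mem_filter.mp hy).2
            simp [h1] at this
      · have hbne : (v != ".") = true := by simp [hdot]
        have hfil : (v :: rest).filter (fun v => v != ".") =
            v :: rest.filter (fun v => v != ".") := by simp [hbne]
        by_cases hmem : v ∈ dic
        · have hstep : pvRowLoopA (v :: rest) dic = false := by
            simp [pvRowLoopA, hbne, hmem]
          rw [hstep, hfil]
          constructor
          · intro h
            exact absurd h (by simp)
          · rintro ⟨-, hdisj⟩
            exact absurd hmem (hdisj v (by simp))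
        · have hstep : pvRowLoopA (v :: rest) dic = pvRowLoopA rest (PySem.Set.add dic v) := by
            simp [pvRowLoopA, hbne, PySem.Set.contains, hmem]
          rw [hstep, ih, hfil]
          constructor
          · rintro ⟨hnd, hdisj⟩
            have hvnot : v ∉ rest.filter (fun v => v != ".") := by
              intro hvin
              have := hdisj v hvin
              rw [PySem.Set.mem_add] at this
              exact this (Or.inr rfl)
            refine ⟨List.nodup_cons.mpr ⟨hvnot, hnd⟩, ?_⟩
            intro y hy
            rcases List.mem_cons.mp hy with rfl | hy'
            · exact hmem
            · intro hyd
              have := hdisj y hy'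
              rw [PySem.Set.mem_add] at this
              exact this (Or.inl hyd)
          · rintro ⟨hnd, hdisj⟩
            rcases List.nodup_cons.mp hnd with ⟨hvnot, hnd'⟩
            refine ⟨hnd', ?_⟩
            intro y hy
            rw [PySem.Set.mem_add]
            rintro (hyd | rfl)
            · exact hdisj y (List.mem_cons_of_mem _ hy) hyd
            · exact hvnot hy

-- B's per-row test equals Nodup of the collected values
lemma alt_row_eq_nodup (row : List String) :
    (!pvHasAdjDup (PySem.List.sorted (row.filter (fun v => v != ".")) (fun x => x) false)) =
      decide (row.filter (fun v => v != ".")).Nodup := by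
  set vals := PySem.List.sorted (row.filter (fun v => v != ".")) (fun x => x) false with hv
  have hperm : vals.Perm (row.filter (fun v => v != ".")) := PySem.List.sorted_perm _ _ _
  have hpw : vals.Pairwise (· ≤ ·) := PySem.List.sorted_pairwise _ _
  have h := hasAdjDup_sorted vals hpw
  rw [hperm.nodup_iff] at h
  by_cases hnd : (row.filter (fun v => v != ".")).Nodup
  · simp [h.mpr hnd, hnd]
  · have : pvHasAdjDup vals = true := by
      cases hb : pvHasAdjDup vals
      · exact absurd (h.mp hb) hnd
      · rfl
    simp [this, hnd]

-- ===== VERDICT =====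
theorem check_all_rows_spec : Claim_equal_check_all_rows := by
  have key : ∀ (grid : List (List String)), check_all_rows grid = check_all_rows_alt grid := by
    intro grid
    induction grid with
    | nil => rfl
    | cons row rest ih =>
        simp only [check_all_rows, check_all_rows_alt, List.all_cons]
        rw [alt_row_eq_nodup]
        by_cases hrow : pvRowLoopA row PySem.Set.empty = true
        · have hnd : (row.filter (fun v => v != ".")).Nodup :=
            ((rowLoopA_eq row _).mp hrow).1
          simp only [hrow, if_true, hnd, decide_true, Bool.true_and]
          exact ih
        · have hnot : ¬ (row.filter (fun v => v != ".")).Nodup := fun hnd =>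
            hrow ((rowLoopA_eq row PySem.Set.empty).mpr
              ⟨hnd, fun v _ h => by simp [PySem.Set.empty] at h⟩)
          rw [if_neg hrow]
          symm
          simp [hnot]
  intro grid _
  exact key grid
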